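-- pv_equiv track=rewrite | github.com/tshigeoka/stock_skills_2 | src/orchestrator/dry_run.py | _match_example
-- ===== SOURCE A (Python) =====
-- from typing import Optional
--
-- def _match_example(input_text: str, examples: list[dict]) -> Optional[dict]:
--     """Find the routing example with the closest matching intent.
--
--     Heuristic: prefer exact intent match, then substring match, then
--     keyword overlap (Jaccard-ish on whitespace tokens).
--     """
--     if not input_text:
--         return None
--     s = input_text.strip()
--     # 1) Exact
--     for ex in examples:
--         if ex.get("intent", "").strip() == s:
--             return ex
--     # 2) Substring
--     for ex in examples:
--         intent = ex.get("intent", "")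
--         if intent and (intent in s or s in intent):
--             return ex
--     # 3) Token overlap
--     s_tokens = set(s)
--     best = None
--     best_overlap = 0
--     for ex in examples:
--         intent = ex.get("intent", "")
--         overlap = len(s_tokens & set(intent))
--         if overlap > best_overlap:
--             best, best_overlap = ex, overlap
--     return best if best_overlap >= 3 else None
-- ===== SOURCE B (Python) =====
-- from typing import Optional
--
-- def _match_example(input_text: str, examples: list[dict]) -> Optional[dict]:
--     """One fused pass: record the first exact match, the first substring
--     match and the best character-overlap candidate, then pick by priority."""
--     if not input_text:
--         return None
--     s = input_text.strip()
--     s_tokens = set(s)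
--     exact = substr = best = None
--     best_overlap = 0
--     for ex in examples:
--         intent = ex.get("intent", "")
--         if exact is None and intent.strip() == s:
--             exact = ex
--         if substr is None and intent and (intent in s or s in intent):
--             substr = ex
--         overlap = len(s_tokens & set(intent))
--         if overlap > best_overlap:
--             best, best_overlap = ex, overlap
--     if exact is not None:
--         return exact
--     if substr is not None:
--         return substr
--     return best if best_overlap >= 3 else None
-- ===== Notes on version B (the rewrite author's own statement) =====
-- stated objective: alternative
-- what changed: Replaced A's three sequential scans over examples (exact, then substring, then best-overlap) by a single fused pass that records the first exact match, the first substring match and the best-overlap candidate simultaneously, then selects by priority.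
import Mathlib
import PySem

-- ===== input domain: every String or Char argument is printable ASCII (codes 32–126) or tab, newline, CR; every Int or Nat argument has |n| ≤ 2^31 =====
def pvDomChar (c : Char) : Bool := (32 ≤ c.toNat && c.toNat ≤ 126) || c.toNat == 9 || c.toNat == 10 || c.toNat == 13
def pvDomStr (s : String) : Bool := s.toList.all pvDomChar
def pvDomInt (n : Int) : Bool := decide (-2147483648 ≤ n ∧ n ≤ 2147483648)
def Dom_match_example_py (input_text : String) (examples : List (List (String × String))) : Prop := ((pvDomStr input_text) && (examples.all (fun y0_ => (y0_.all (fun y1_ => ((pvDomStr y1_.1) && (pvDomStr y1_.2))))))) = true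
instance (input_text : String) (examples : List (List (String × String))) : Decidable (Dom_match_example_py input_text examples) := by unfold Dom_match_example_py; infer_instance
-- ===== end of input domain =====

-- B fuses A's three sequential scans over `examples` into one pass; alternative decomposition (no speed claim).

-- shared per-example pieces (identical expressions in both Pythons):
-- ex.get("intent", "") on the association-list encoding of a Python dict
def pvGetIntent (ex : List (String × String)) : String :=
  PySem.Dict.getD (PySem.Dict.mk ex) "intent" ""
-- ex.get("intent", "").strip() == s
def pvExactP (s : String) (ex : List (String × String)) : Bool :=
  PySem.Str.strip (pvGetIntent ex) == s
-- intent and (intent in s or s in intent)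
def pvSubstrP (s : String) (ex : List (String × String)) : Bool :=
  let intent := pvGetIntent ex
  intent != "" && (PySem.Str.isIn intent s || PySem.Str.isIn s intent)
-- the body of the overlap loop: update (best, best_overlap)
def pvOverlapStep (tok : List Char) (acc : Option (List (String × String)) × Int)
    (ex : List (String × String)) : Option (List (String × String)) × Int :=
  let intent := pvGetIntent ex
  let overlap := PySem.Set.len (PySem.Set.inter tok intent.toList)
  if overlap > acc.2 then (some ex, overlap) else acc

-- ===== PORT A =====
-- Three sequential scans, as in the Python: the two first-match loops are
-- List.find?, the best-overlap loop is a foldl over (best, best_overlap).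
def match_example_py (input_text : String) (examples : List (List (String × String))) : Option (List (String × String)) :=
  if input_text = "" then none
  else
    let s := PySem.Str.strip input_text
    match examples.find? (pvExactP s) with
    | some ex => some ex
    | none =>
      match examples.find? (pvSubstrP s) with
      | some ex => some ex
      | none =>
        let sTokens := PySem.Set.ofList s.toList
        let r := examples.foldl (pvOverlapStep sTokens) (none, 0)
        if r.2 ≥ 3 then r.1 else none

-- ===== PORT B =====
-- One fused pass: the state carries (first exact, first substring, (best, best_overlap)).
def pvFusedStep (s : String) (tok : List Char)
    (acc : Option (List (String × String)) × Option (List (String × String)) ×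
           (Option (List (String × String)) × Int))
    (ex : List (String × String)) :
    Option (List (String × String)) × Option (List (String × String)) ×
    (Option (List (String × String)) × Int) :=
  (match acc.1 with
   | some e => some e
   | none => if pvExactP s ex then some ex else none,
   match acc.2.1 with
   | some e => some e
   | none => if pvSubstrP s ex then some ex else none,
   pvOverlapStep tok acc.2.2 ex)

def match_example_py_alt (input_text : String) (examples : List (List (String × String))) : Option (List (String × String)) :=
  if input_text = "" then none
  else
    let s := PySem.Str.strip input_text
    let sTokens := PySem.Set.ofList s.toList
    let r := examples.foldl (pvFusedStep s sTokens) (none, none, (none, 0))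
    match r.1 with
    | some e => some e
    | none =>
      match r.2.1 with
      | some e => some e
      | none => if r.2.2.2 ≥ 3 then r.2.2.1 else none

-- ===== PRECONDITION & SPEC =====
def Spec_match_example_py (input_text : String) (examples : List (List (String × String))) (out : Option (List (String × String))) : Prop := out = match_example_py_alt input_text examples
instance (input_text : String) (examples : List (List (String × String))) (out : Option (List (String × String))) : Decidable (Spec_match_example_py input_text examples out) := by unfold Spec_match_example_py; infer_instance

-- ===== CLAIM (what is proved, stated in full; the proofs are below) =====
def Claim_equal_match_example_py : Prop := ∀ (input_text : String) (examples : List (List (String × String))), Dom_match_example_py input_text examples → Spec_match_example_py input_text examples (match_example_py input_text examples)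

-- ===== LEMMAS AND PROOFS =====

-- B's fused fold, characterised componentwise in terms of A's three scans.
theorem foldl_fusedStep (s : String) (tok : List Char) (l : List (List (String × String))) :
    ∀ st, l.foldl (pvFusedStep s tok) st =
      ((match st.1 with | some v => some v | none => l.find? (pvExactP s)),
       (match st.2.1 with | some v => some v | none => l.find? (pvSubstrP s)),
       l.foldl (pvOverlapStep tok) st.2.2) := by
  induction l with
  | nil => intro st; cases st with | mk a bc => cases bc with | mk b c =>
      cases a <;> cases b <;> rfl
  | cons x t ih =>
    intro st
    rw [List.foldl_cons, List.foldl_cons, ih]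
    cases st with | mk a bc => cases bc with | mk b c =>
    cases a <;> cases b <;>
      simp only [pvFusedStep, List.find?] <;>
      cases hx : pvExactP s x <;> cases hy : pvSubstrP s x <;> simp [*]

-- ===== VERDICT (by name: the statement is the Claim_ definition above) =====
theorem match_example_py_spec : Claim_equal_match_example_py := by
  intro input_text examples _
  unfold Spec_match_example_py match_example_py match_example_py_alt
  by_cases h : input_text = ""
  · simp [h]
  · simp only [h, if_false]
    rw [foldl_fusedStep]
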